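-- pv_equiv track=rewrite | github.com/Testforever-git/Vehicle_management | app/blueprints/admin/routes.py | _logical_fields_for_table
-- ===== SOURCE A (Python) =====
-- SYSTEM_FIELDS = {
--     "id",
--     "created_at",
--     "created_by",
--     "created_date",
--     "updated_at",
--     "updated_by",
--     "updated_date",
-- }
--
-- def _logical_field_name(table_fields, field_name: str) -> str:
--     if field_name.endswith(("_cn", "_jp")):
--         base = field_name[:-3]
--         if f"{base}_cn" in table_fields and f"{base}_jp" in table_fields:
--             return base
--     return field_name
--
-- def _logical_fields_for_table(table_fields):
--     logical_fields = []
--     seen = set()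
--     for field_name in sorted(table_fields):
--         if field_name in SYSTEM_FIELDS:
--             continue
--         logical_name = _logical_field_name(table_fields, field_name)
--         if logical_name in SYSTEM_FIELDS or logical_name in seen:
--             continue
--         seen.add(logical_name)
--         logical_fields.append(logical_name)
--     return logical_fields
-- ===== SOURCE B (Python) =====
-- SYSTEM_FIELDS = {
--     "id",
--     "created_at",
--     "created_by",
--     "created_date",
--     "updated_at",
--     "updated_by",
--     "updated_date",
-- }
--
-- def _logical_fields_for_table(table_fields):
--     # Group-argmin instead of sort-and-scan-with-a-seen-set: one unsorted pass
--     # records, per logical name, the smallest field of its class; the answer is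
--     # the logical names of those class minima in ascending order (a class's
--     # minimum field is exactly its first occurrence in sorted order), so no
--     # seen-set or dedup step exists and only the representatives get sorted.
--     def name_of(f):
--         if f.endswith(("_cn", "_jp")):
--             base = f[:-3]
--             if f"{base}_cn" in table_fields and f"{base}_jp" in table_fields:
--                 return base
--         return f
--
--     best = {}  # logical name -> smallest field of its class
--     for f in table_fields:
--         n = name_of(f)
--         if f in SYSTEM_FIELDS or n in SYSTEM_FIELDS:
--             continue
--         if n not in best or f < best[n]:
--             best[n] = f
--     return [name_of(f) for f in sorted(best.values())]
-- ===== Notes on version B (the rewrite author's own statement) =====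
-- stated objective: alternative
-- what changed: Replaced A's sort-everything-then-scan with an inline seen-set by group-argmin: one unsorted pass records per logical name the smallest field of its class in a dict, and the result is the logical names of those class minima in ascending order, so the seen-set and dedup step disappear and only the class representatives are sorted.
import Mathlib
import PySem

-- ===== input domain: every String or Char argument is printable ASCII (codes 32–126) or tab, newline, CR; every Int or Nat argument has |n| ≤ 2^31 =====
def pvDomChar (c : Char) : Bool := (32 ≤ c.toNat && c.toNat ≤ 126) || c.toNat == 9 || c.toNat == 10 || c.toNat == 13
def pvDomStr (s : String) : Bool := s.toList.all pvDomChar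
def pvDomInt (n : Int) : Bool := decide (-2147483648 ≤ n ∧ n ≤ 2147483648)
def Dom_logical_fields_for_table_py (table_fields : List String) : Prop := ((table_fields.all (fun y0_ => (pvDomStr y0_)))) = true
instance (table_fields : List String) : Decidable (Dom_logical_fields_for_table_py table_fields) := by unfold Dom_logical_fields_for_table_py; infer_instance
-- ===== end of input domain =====

-- B replaces A's sort-then-scan with an inline seen-set by a group-argmin pass (dict of
-- per-class minimum fields) followed by a sort of the representatives only; same return
-- value on every input (both total).

-- ===== PORT A =====
def pySystemFields : List String :=
  ["id", "created_at", "created_by", "created_date", "updated_at", "updated_by", "updated_date"]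

def logicalFieldNameA (table_fields : List String) (field_name : String) : String :=
  if PySem.Str.endswith field_name "_cn" || PySem.Str.endswith field_name "_jp" then
    let base := PySem.Str.slice field_name none (some (-3))
    if table_fields.contains (base ++ "_cn") && table_fields.contains (base ++ "_jp") then base
    else field_name
  else field_name

def logical_fields_for_table_py (table_fields : List String) : List String :=
  ((PySem.List.sorted table_fields (fun x => x) false).foldl
    (fun (st : List String × PySem.Set String) field_name =>
      if pySystemFields.contains field_name then st
      else if pySystemFields.contains (logicalFieldNameA table_fields field_name) ||
              PySem.Set.contains st.2 (logicalFieldNameA table_fields field_name) then st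
      else (st.1 ++ [logicalFieldNameA table_fields field_name],
            PySem.Set.add st.2 (logicalFieldNameA table_fields field_name)))
    (([] : List String), (PySem.Set.empty : PySem.Set String))).1

-- ===== PORT B =====
-- Source B's closure name_of(f) (textually the same computation as A's module helper)
def nameOfB (table_fields : List String) (f : String) : String :=
  if PySem.Str.endswith f "_cn" || PySem.Str.endswith f "_jp" then
    let base := PySem.Str.slice f none (some (-3))
    if table_fields.contains (base ++ "_cn") && table_fields.contains (base ++ "_jp") then base
    else f
  else f

-- Source B's grouping loop: best[n] = smallest field of logical-name class n.
-- Python reads best[n] only when 'n in best' (or-short-circuit), so getD's "" default is never used.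
def bestDict (table_fields : List String) : PySem.Dict String String :=
  table_fields.foldl
    (fun d f =>
      let n := nameOfB table_fields f
      if pySystemFields.contains f || pySystemFields.contains n then d
      else if !(PySem.Dict.contains d n) || decide (f < PySem.Dict.getD d n "") then
        PySem.Dict.insert d n f
      else d)
    PySem.Dict.empty

def logical_fields_for_table_py_alt (table_fields : List String) : List String :=
  (PySem.List.sorted (PySem.Dict.values (bestDict table_fields)) (fun x => x) false).map
    (nameOfB table_fields)

-- ===== PRECONDITION & SPEC =====
def Spec_logical_fields_for_table_py (table_fields : List String) (out : List String) : Prop := out = logical_fields_for_table_py_alt table_fields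
instance (table_fields : List String) (out : List String) : Decidable (Spec_logical_fields_for_table_py table_fields out) := by unfold Spec_logical_fields_for_table_py; infer_instance

-- ===== CLAIM (what is proved, stated in full; the proofs are below) =====
def Claim_equal_logical_fields_for_table_py : Prop := ∀ (table_fields : List String), Dom_logical_fields_for_table_py table_fields → Spec_logical_fields_for_table_py table_fields (logical_fields_for_table_py table_fields)

-- ===== LEMMAS AND PROOFS =====

-- A's (list, seen-set) pair keeps both components equal; collapse to one accumulator
lemma pair_collapse (tf : List String) (l : List String) (a : List String) :
    (l.foldl
      (fun (st : List String × PySem.Set String) field_name =>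
        if pySystemFields.contains field_name then st
        else if pySystemFields.contains (logicalFieldNameA tf field_name) ||
                PySem.Set.contains st.2 (logicalFieldNameA tf field_name) then st
        else (st.1 ++ [logicalFieldNameA tf field_name],
              PySem.Set.add st.2 (logicalFieldNameA tf field_name)))
      (a, (a : PySem.Set String))).1 =
    l.foldl
      (fun acc field_name =>
        if pySystemFields.contains field_name then acc
        else if pySystemFields.contains (logicalFieldNameA tf field_name) ||
                PySem.Set.contains (acc : PySem.Set String) (logicalFieldNameA tf field_name)
             then acc
        else acc ++ [logicalFieldNameA tf field_name])
      a := by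
  induction l generalizing a with
  | nil => rfl
  | cons f t ih =>
    simp only [List.foldl_cons]
    by_cases h1 : pySystemFields.contains f = true
    · simp only [h1, if_true]; exact ih a
    · simp only [h1, Bool.false_eq_true, if_false]
      by_cases h2 : (pySystemFields.contains (logicalFieldNameA tf f) ||
          PySem.Set.contains (a : PySem.Set String) (logicalFieldNameA tf f)) = true
      · simp only [h2, if_true]; exact ih a
      · have hne : (a : PySem.Set String).contains (logicalFieldNameA tf f) = false := by
          simp only [Bool.or_eq_true, not_or, Bool.not_eq_true] at h2
          exact h2.2
        have hadd : PySem.Set.add (a : PySem.Set String) (logicalFieldNameA tf f) =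
            a ++ [logicalFieldNameA tf f] := by
          simp only [PySem.Set.add, PySem.Set.contains, hne, Bool.false_eq_true, if_false]
        simp only [h2, Bool.false_eq_true, if_false, hadd]
        exact ih (a ++ [logicalFieldNameA tf f])

-- elements equal to an already-present value contribute nothing to a Set.add fold
lemma foldl_add_skip (l : List String) (s : List String) (a : String)
    (hs : PySem.Set.contains s a = true) :
    l.foldl PySem.Set.add s = (l.filter (fun x => x != a)).foldl PySem.Set.add s := by
  induction l generalizing s with
  | nil => rfl
  | cons x t ih =>
    by_cases hx : x = a
    · subst hx
      have hskip : PySem.Set.add s x = s := by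
        simp only [PySem.Set.add, hs, if_true]
      simp only [List.foldl_cons, List.filter_cons, bne_self_eq_false, Bool.false_eq_true,
        if_false, hskip]
      exact ih s hs
    · have hb : (x != a) = true := by simp [bne, hx]
      simp only [List.foldl_cons, List.filter_cons, hb, if_true]
      refine ih (PySem.Set.add s x) ?_
      simp only [PySem.Set.contains, List.contains_eq_mem, decide_eq_true_eq] at hs ⊢
      exact (PySem.Set.mem_add _ _ _).mpr (Or.inl hs)

-- a head already emitted stays in front when no later element equals it
lemma foldl_add_cons_head (l : List String) (s : List String) (a : String)
    (hl : ∀ y ∈ l, y ≠ a) :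
    l.foldl PySem.Set.add (a :: s) = a :: l.foldl PySem.Set.add s := by
  induction l generalizing s with
  | nil => rfl
  | cons x t ih =>
    have hxa : x ≠ a := hl x (List.mem_cons_self ..)
    have hstep : PySem.Set.add (a :: s) x = a :: PySem.Set.add s x := by
      simp only [PySem.Set.add, PySem.Set.contains, List.contains_cons]
      have hax : (x == a) = false := by simp [hxa]
      simp only [hax, Bool.false_or]
      split_ifs <;> rfl
    simp only [List.foldl_cons, hstep]
    exact ih (PySem.Set.add s x) (fun y hy => hl y (List.mem_cons_of_mem _ hy))

-- ofList's first-occurrence recurrence: head stays, later equals vanish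
lemma ofList_cons_filter (a : String) (l : List String) :
    PySem.Set.ofList (a :: l) = a :: PySem.Set.ofList (l.filter (fun x => x != a)) := by
  have h1 : PySem.Set.ofList (a :: l) = l.foldl PySem.Set.add [a] := by
    rw [PySem.Set.ofList_eq_foldl]; rfl
  rw [h1, foldl_add_skip l [a] a (by simp [PySem.Set.contains])]
  rw [show ([a] : List String) = a :: [] from rfl]
  rw [foldl_add_cons_head _ _ _ (fun y hy => by
    have hy' := List.of_mem_filter hy
    simpa [bne] using hy')]
  rw [PySem.Set.ofList_eq_foldl]

-- proof-side selection recursion: the class minima of R in ascending order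
def selFields (nm : String → String) (R : List String) : List String :=
  match h : PySem.List.min? R (fun x => x) with
  | none => []
  | some g => g :: selFields nm (R.filter (fun x => nm x != nm g))
termination_by R.length
decreasing_by
  simp
  exact ⟨g, PySem.List.min?_mem h, rfl⟩

lemma selFields_nil (nm : String → String) (R : List String)
    (h : PySem.List.min? R (fun x => x) = none) : selFields nm R = [] := by
  rw [selFields.eq_def]
  split
  · rfl
  · rename_i g' h'; rw [h] at h'; cases h'

lemma selFields_some (nm : String → String) (R : List String) (g : String)
    (h : PySem.List.min? R (fun x => x) = some g) :
    selFields nm R = g :: selFields nm (R.filter (fun x => nm x != nm g)) := by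
  rw [selFields.eq_def]
  split
  · rename_i h'; rw [h] at h'; cases h'
  · rename_i g' h'; rw [h] at h'; cases h'; rfl

-- the selection list on any rearrangement of a ≤-sorted list maps to first-occurrence dedup
lemma selFields_map_eq_dedup (nm : String → String) :
    ∀ (n : Nat) (G R : List String), G.length ≤ n → G.Pairwise (· ≤ ·) → R.Perm G →
      (selFields nm R).map nm = PySem.Set.ofList (G.map nm) := by
  intro n
  induction n with
  | zero =>
    intro G R hlen _ hperm
    have hG : G = [] := List.length_eq_zero_iff.mp (Nat.le_zero.mp hlen)
    subst hG
    rw [List.Perm.eq_nil hperm,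
      selFields_nil nm [] ((PySem.List.min?_eq_none_iff [] (fun x => x)).mpr rfl)]
    rfl
  | succ n ih =>
    intro G R hlen hpw hperm
    cases G with
    | nil =>
      rw [List.Perm.eq_nil hperm,
        selFields_nil nm [] ((PySem.List.min?_eq_none_iff [] (fun x => x)).mpr rfl)]
      rfl
    | cons g G' =>
      have hgmem : g ∈ R := hperm.symm.subset (List.mem_cons_self ..)
      have hRne : R ≠ [] := fun h => by simp [h] at hgmem
      obtain ⟨m, hm⟩ : ∃ m, PySem.List.min? R (fun x => x) = some m := by
        cases hmin : PySem.List.min? R (fun x => x) with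
        | none => exact absurd ((PySem.List.min?_eq_none_iff R (fun x => x)).mp hmin) hRne
        | some m => exact ⟨m, rfl⟩
      have hmval : m = g := by
        have hmmem : m ∈ R := PySem.List.min?_mem hm
        have hmle : m ≤ g := PySem.List.min?_isMin hm g hgmem
        rcases List.mem_cons.mp (hperm.subset hmmem) with h | h
        · exact h
        · exact le_antisymm hmle ((List.pairwise_cons.mp hpw).1 m h)
      subst hmval
      rw [selFields_some nm R m hm]
      have hmapcons : (m :: G').map nm = nm m :: G'.map nm := rfl
      rw [hmapcons, ofList_cons_filter]
      have hcomm : (G'.map nm).filter (fun y => y != nm m) =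
          (G'.filter (fun x => nm x != nm m)).map nm := by
        rw [List.filter_map]; rfl
      rw [hcomm, List.map_cons]
      congr 1
      refine ih (G'.filter (fun x => nm x != nm m)) (R.filter (fun x => nm x != nm m)) ?_ ?_ ?_
      · exact le_trans (List.length_filter_le _ _)
          (Nat.lt_succ_iff.mp (Nat.lt_of_lt_of_le (Nat.lt_succ_self _) hlen))
      · exact List.Pairwise.filter _ ((List.pairwise_cons.mp hpw).2)
      · have hpf := hperm.filter (fun x => nm x != nm m)
        simpa using hpf

-- membership in the selection list: exactly the per-class minima
lemma selFields_mem (nm : String → String) :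
    ∀ (n : Nat) (R : List String), R.length ≤ n → ∀ x,
      x ∈ selFields nm R ↔ (x ∈ R ∧ ∀ y ∈ R, nm y = nm x → x ≤ y) := by
  intro n
  induction n with
  | zero =>
    intro R hlen x
    have hR : R = [] := List.length_eq_zero_iff.mp (Nat.le_zero.mp hlen)
    subst hR
    rw [selFields_nil nm [] ((PySem.List.min?_eq_none_iff [] (fun x => x)).mpr rfl)]
    simp
  | succ n ih =>
    intro R hlen x
    cases hmin : PySem.List.min? R (fun x => x) with
    | none =>
      have hR : R = [] := (PySem.List.min?_eq_none_iff R (fun x => x)).mp hmin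
      subst hR
      rw [selFields_nil nm [] ((PySem.List.min?_eq_none_iff [] (fun x => x)).mpr rfl)]
      simp
    | some g =>
      have hgmem : g ∈ R := PySem.List.min?_mem hmin
      have hgmin : ∀ y ∈ R, g ≤ y := fun y hy => PySem.List.min?_isMin hmin y hy
      have hlen' : (R.filter (fun x => nm x != nm g)).length ≤ n := by
        have hlt : (R.filter (fun x => nm x != nm g)).length < R.length :=
          List.length_filter_lt_length_iff_exists.mpr ⟨g, hgmem, by simp⟩
        omega
      rw [selFields_some nm R g hmin]
      constructor
      · intro hx
        rcases List.mem_cons.mp hx with hx | hx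
        · subst hx; exact ⟨hgmem, fun y hy _ => hgmin y hy⟩
        · obtain ⟨hxR, hxmin⟩ := (ih _ hlen' x).mp hx
          have hxne : (nm x != nm g) = true := (List.mem_filter.mp hxR).2
          refine ⟨(List.mem_filter.mp hxR).1, fun y hy hny => ?_⟩
          refine hxmin y (List.mem_filter.mpr ⟨hy, ?_⟩) hny
          rw [hny]; exact hxne
      · rintro ⟨hxR, hxmin⟩
        by_cases hsame : nm x = nm g
        · have hxg : x = g :=
            le_antisymm (hxmin g hgmem hsame.symm) (hgmin x hxR)
          exact List.mem_cons.mpr (Or.inl hxg)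
        · refine List.mem_cons.mpr (Or.inr ((ih _ hlen' x).mpr ⟨?_, ?_⟩))
          · exact List.mem_filter.mpr ⟨hxR, by simp [bne, hsame]⟩
          · exact fun y hy hny => hxmin y (List.mem_filter.mp hy).1 hny

-- the selection list is strictly increasing
lemma selFields_pairwise (nm : String → String) :
    ∀ (n : Nat) (R : List String), R.length ≤ n → (selFields nm R).Pairwise (· < ·) := by
  intro n
  induction n with
  | zero =>
    intro R hlen
    have hR : R = [] := List.length_eq_zero_iff.mp (Nat.le_zero.mp hlen)
    subst hR
    rw [selFields_nil nm [] ((PySem.List.min?_eq_none_iff [] (fun x => x)).mpr rfl)]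
    exact List.Pairwise.nil
  | succ n ih =>
    intro R hlen
    cases hmin : PySem.List.min? R (fun x => x) with
    | none =>
      rw [selFields_nil nm R hmin]
      exact List.Pairwise.nil
    | some g =>
      have hgmem : g ∈ R := PySem.List.min?_mem hmin
      have hgmin : ∀ y ∈ R, g ≤ y := fun y hy => PySem.List.min?_isMin hmin y hy
      have hlen' : (R.filter (fun x => nm x != nm g)).length ≤ n := by
        have hlt : (R.filter (fun x => nm x != nm g)).length < R.length :=
          List.length_filter_lt_length_iff_exists.mpr ⟨g, hgmem, by simp⟩
        omega
      rw [selFields_some nm R g hmin]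
      refine List.pairwise_cons.mpr ⟨fun x hx => ?_, ih _ hlen'⟩
      obtain ⟨hxR, _⟩ := (selFields_mem nm n _ hlen' x).mp hx
      have hxne : (nm x != nm g) = true := (List.mem_filter.mp hxR).2
      have hxmem : x ∈ R := (List.mem_filter.mp hxR).1
      refine lt_of_le_of_ne (hgmin x hxmem) (fun hgx => ?_)
      subst hgx
      simp at hxne

-- the grouping step over an already-filtered list
def bestStep (nm : String → String) (d : PySem.Dict String String) (f : String) :
    PySem.Dict String String :=
  if !(PySem.Dict.contains d (nm f)) || decide (f < PySem.Dict.getD d (nm f) "") then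
    PySem.Dict.insert d (nm f) f
  else d

-- fold invariant: keys are unique, contains = class inhabited, get? = the class minimum
lemma bestFold_inv (nm : String → String) (R : List String) :
    (R.foldl (bestStep nm) PySem.Dict.empty).keys.Nodup ∧
    (∀ k, (R.foldl (bestStep nm) PySem.Dict.empty).contains k = true ↔ ∃ y ∈ R, nm y = k) ∧
    (∀ k v, (R.foldl (bestStep nm) PySem.Dict.empty).get? k = some v ↔
      (v ∈ R ∧ nm v = k ∧ ∀ y ∈ R, nm y = k → v ≤ y)) := by
  induction R using List.reverseRecOn with
  | nil =>
    refine ⟨PySem.Dict.nodup_keys_empty, fun k => ?_, fun k v => ?_⟩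
    · simp [PySem.Dict.contains_empty]
    · simp [PySem.Dict.get?_empty]
  | append_singleton R f ih =>
    obtain ⟨hnd, hct, hgt⟩ := ih
    rw [List.foldl_append, List.foldl_cons, List.foldl_nil]
    set d := R.foldl (bestStep nm) PySem.Dict.empty with hd
    by_cases hins : (!(PySem.Dict.contains d (nm f)) ||
        decide (f < PySem.Dict.getD d (nm f) "")) = true
    · -- f is inserted: it is a strictly better (or first) minimum of its class
      have hfmin : ∀ y ∈ R, nm y = nm f → f ≤ y := by
        intro y hy hny
        rw [Bool.or_eq_true] at hins
        rcases hins with hnc | hlt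
        · exact absurd ((hct (nm f)).mpr ⟨y, hy, hny⟩) (by simpa using hnc)
        · have hc : d.contains (nm f) = true := (hct (nm f)).mpr ⟨y, hy, hny⟩
          have hsome : (d.get? (nm f)).isSome := by
            rw [← PySem.Dict.contains_eq_isSome_get?]; exact hc
          obtain ⟨v0, hv0⟩ : ∃ v0, d.get? (nm f) = some v0 :=
            Option.isSome_iff_exists.mp hsome
          have hgd : PySem.Dict.getD d (nm f) "" = v0 :=
            PySem.Dict.getD_of_get?_eq_some d "" hv0
          have hv0min := ((hgt (nm f) v0).mp hv0).2.2 y hy hny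
          have hflt : f < v0 := by rw [← hgd]; exact of_decide_eq_true hlt
          exact le_trans (le_of_lt hflt) hv0min
      have hstep : bestStep nm d f = PySem.Dict.insert d (nm f) f := by
        unfold bestStep; rw [hins]; simp
      rw [hstep]
      refine ⟨PySem.Dict.nodup_keys_insert _ _ _ hnd, fun k => ?_, fun k v => ?_⟩
      · rw [PySem.Dict.contains_insert, Bool.or_eq_true]
        constructor
        · intro h
          rcases h with h | h
          · exact ⟨f, by simp, (eq_of_beq h).symm⟩
          · obtain ⟨y, hy, hny⟩ := (hct k).mp h
            exact ⟨y, List.mem_append.mpr (Or.inl hy), hny⟩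
        · rintro ⟨y, hy, hny⟩
          rcases List.mem_append.mp hy with hy | hy
          · exact Or.inr ((hct k).mpr ⟨y, hy, hny⟩)
          · have hyf : y = f := by simpa using hy
            subst hyf
            exact Or.inl (by simp [hny])
      · by_cases hk : k = nm f
        · subst hk
          rw [PySem.Dict.get?_insert_self]
          constructor
          · intro h
            have hfv : f = v := by injection h
            subst hfv
            refine ⟨List.mem_append.mpr (Or.inr (by simp)), rfl, fun y hy hny => ?_⟩
            rcases List.mem_append.mp hy with hy | hy
            · exact hfmin y hy hny
            · have hyf : y = f := by simpa using hy
              subst hyf; exact le_refl _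
          · rintro ⟨hv, hnv, hvmin⟩
            have h1 : v ≤ f := hvmin f (List.mem_append.mpr (Or.inr (by simp))) rfl
            have h2 : f ≤ v := by
              rcases List.mem_append.mp hv with hv | hv
              · exact hfmin v hv hnv
              · have hvf : v = f := by simpa using hv
                simp [hvf]
            rw [le_antisymm h1 h2]
        · rw [PySem.Dict.get?_insert_of_ne d f hk, hgt k v]
          constructor
          · rintro ⟨hv, hnv, hvmin⟩
            refine ⟨List.mem_append.mpr (Or.inl hv), hnv, fun y hy hny => ?_⟩
            rcases List.mem_append.mp hy with hy | hy
            · exact hvmin y hy hny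
            · have hyf : y = f := by simpa using hy
              subst hyf; exact absurd hny.symm hk
          · rintro ⟨hv, hnv, hvmin⟩
            rcases List.mem_append.mp hv with hv | hv
            · exact ⟨hv, hnv, fun y hy hny => hvmin y (List.mem_append.mpr (Or.inl hy)) hny⟩
            · have hvf : v = f := by simpa using hv
              exact absurd ((by simpa [hvf] using hnv : nm f = k)).symm hk
    · -- f is not inserted: the stored minimum of its class is already ≤ f
      have hins' : (!(PySem.Dict.contains d (nm f)) ||
          decide (f < PySem.Dict.getD d (nm f) "")) = false := by
        simpa using hins
      have hc : d.contains (nm f) = true := by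
        by_contra hcf
        have hcf' : d.contains (nm f) = false := by simpa using hcf
        simp [hcf'] at hins'
      have hsome : (d.get? (nm f)).isSome := by
        rw [← PySem.Dict.contains_eq_isSome_get?]; exact hc
      obtain ⟨v0, hv0⟩ : ∃ v0, d.get? (nm f) = some v0 := Option.isSome_iff_exists.mp hsome
      have hgd : PySem.Dict.getD d (nm f) "" = v0 := PySem.Dict.getD_of_get?_eq_some d "" hv0
      have hv0f : v0 ≤ f := by
        have hnlt : ¬ f < PySem.Dict.getD d (nm f) "" := by
          intro hlt; simp [hc, hlt] at hins'
        rw [hgd] at hnlt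
        exact le_of_not_gt hnlt
      obtain ⟨hv0R, hv0nm, hv0min⟩ := (hgt (nm f) v0).mp hv0
      have hstep : bestStep nm d f = d := by
        unfold bestStep; rw [hins']; simp
      rw [hstep]
      refine ⟨hnd, fun k => ?_, fun k v => ?_⟩
      · rw [hct k]
        constructor
        · rintro ⟨y, hy, hny⟩; exact ⟨y, List.mem_append.mpr (Or.inl hy), hny⟩
        · rintro ⟨y, hy, hny⟩
          rcases List.mem_append.mp hy with hy | hy
          · exact ⟨y, hy, hny⟩
          · have hyf : y = f := by simpa using hy
            subst hyf
            exact ⟨v0, hv0R, hny ▸ hv0nm⟩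
      · rw [hgt k v]
        constructor
        · rintro ⟨hv, hnv, hvmin⟩
          refine ⟨List.mem_append.mpr (Or.inl hv), hnv, fun y hy hny => ?_⟩
          rcases List.mem_append.mp hy with hy | hy
          · exact hvmin y hy hny
          · have hyf : y = f := by simpa using hy
            rw [hyf]
            -- here nm f = k, so v is the stored minimum v0, and v0 ≤ f
            have hkf : nm f = k := by rw [← hyf]; exact hny
            have hv' : d.get? k = some v := (hgt k v).mpr ⟨hv, hnv, hvmin⟩
            rw [hkf] at hv0
            rw [hv0] at hv'
            have hveq : v = v0 := by injection hv'.symm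
            rw [hveq]; exact hv0f
        · rintro ⟨hv, hnv, hvmin⟩
          rcases List.mem_append.mp hv with hv | hv
          · exact ⟨hv, hnv, fun y hy hny => hvmin y (List.mem_append.mpr (Or.inl hy)) hny⟩
          · have hvf : v = f := by simpa using hv
            -- v = f is minimal over R ++ [f]; the stored v0 equals it as a value
            have hle : v0 ≤ v := by rw [hvf]; exact hv0f
            have hge : v ≤ v0 := hvmin v0 (List.mem_append.mpr (Or.inl hv0R))
              (by rw [hv0nm, ← hvf]; exact hnv)
            have hveq : v0 = v := le_antisymm hle hge
            exact ⟨hveq ▸ hv0R, hnv,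
              fun y hy hny => hvmin y (List.mem_append.mpr (Or.inl hy)) hny⟩

-- membership in the dict's values = the per-class minima
lemma bestFold_values_mem (nm : String → String) (R : List String) (x : String) :
    x ∈ (R.foldl (bestStep nm) PySem.Dict.empty).values ↔
      (x ∈ R ∧ ∀ y ∈ R, nm y = nm x → x ≤ y) := by
  obtain ⟨hnd, _, hgt⟩ := bestFold_inv nm R
  set d := R.foldl (bestStep nm) PySem.Dict.empty with hd
  constructor
  · intro hx
    obtain ⟨k, hk⟩ : ∃ k, (k, x) ∈ d.items := by
      simpa [PySem.Dict.values, List.mem_map] using hx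
    have hget : d.get? k = some x := (PySem.Dict.get?_eq_some_iff_mem_items d k x hnd).mpr hk
    obtain ⟨hv, hnv, hvmin⟩ := (hgt k x).mp hget
    exact ⟨hv, fun y hy hny => hvmin y hy (by rw [hny, hnv])⟩
  · rintro ⟨hx, hxmin⟩
    have hget : d.get? (nm x) = some x := (hgt (nm x) x).mpr ⟨hx, rfl, hxmin⟩
    have hitem : (nm x, x) ∈ d.items := PySem.Dict.mem_items_of_get?_eq_some d hget
    have : ∃ k, (k, x) ∈ d.items := ⟨nm x, hitem⟩
    simpa [PySem.Dict.values, List.mem_map] using this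

-- the values list has no duplicates (a value determines its key)
lemma bestFold_values_nodup (nm : String → String) (R : List String) :
    (R.foldl (bestStep nm) PySem.Dict.empty).values.Nodup := by
  obtain ⟨hnd, _, hgt⟩ := bestFold_inv nm R
  set d := R.foldl (bestStep nm) PySem.Dict.empty with hd
  rw [PySem.Dict.values_eq_map_keys d hnd ""]
  refine List.Nodup.map_on ?_ hnd
  intro k1 hk1 k2 hk2 heq
  have h1 : d.get? k1 = some (d.getD k1 "") := by
    have hc : d.contains k1 = true := (PySem.Dict.contains_iff_mem_keys d k1).mpr hk1
    have hsome : (d.get? k1).isSome := by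
      rw [← PySem.Dict.contains_eq_isSome_get?]; exact hc
    obtain ⟨v, hv⟩ : ∃ v, d.get? k1 = some v := Option.isSome_iff_exists.mp hsome
    rw [hv, PySem.Dict.getD_of_get?_eq_some d "" hv]
  have h2 : d.get? k2 = some (d.getD k2 "") := by
    have hc : d.contains k2 = true := (PySem.Dict.contains_iff_mem_keys d k2).mpr hk2
    have hsome : (d.get? k2).isSome := by
      rw [← PySem.Dict.contains_eq_isSome_get?]; exact hc
    obtain ⟨v, hv⟩ : ∃ v, d.get? k2 = some v := Option.isSome_iff_exists.mp hsome
    rw [hv, PySem.Dict.getD_of_get?_eq_some d "" hv]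
  have e1 := ((hgt k1 _).mp h1).2.1
  have e2 := ((hgt k2 _).mp h2).2.1
  rw [← e1, ← e2, heq]

-- ===== VERDICT (by name: the statement is the Claim_ definition above) =====
theorem logical_fields_for_table_py_spec : Claim_equal_logical_fields_for_table_py := by
  intro tf _
  show logical_fields_for_table_py tf = logical_fields_for_table_py_alt tf
  unfold logical_fields_for_table_py logical_fields_for_table_py_alt bestDict
  have hnm : nameOfB tf = logicalFieldNameA tf := rfl
  rw [hnm]
  set nm := logicalFieldNameA tf with hnmdef
  set goodb : String → Bool :=
    (fun f => !pySystemFields.contains f && !pySystemFields.contains (nm f)) with hgood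
  -- A's side: collapse the pair state, fuse the tests, land on ofList of the mapped filter
  rw [show (([] : List String), (PySem.Set.empty : PySem.Set String)) =
      (([] : List String), (([] : List String) : PySem.Set String)) from rfl]
  rw [pair_collapse tf (PySem.List.sorted tf (fun x => x) false) []]
  have hA : (PySem.List.sorted tf (fun x => x) false).foldl
      (fun acc f =>
        if pySystemFields.contains f then acc
        else if pySystemFields.contains (nm f) ||
                PySem.Set.contains (acc : PySem.Set String) (nm f) then acc
        else acc ++ [nm f])
      ([] : List String) =
      (PySem.List.sorted tf (fun x => x) false).foldl
      (fun acc f =>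
        if goodb f = true then PySem.Set.add (acc : PySem.Set String) (nm f) else acc)
      ([] : List String) := by
    apply PySem.List.foldl_congr_mem
    intro acc f _
    by_cases h1 : f ∈ pySystemFields <;>
      by_cases h2 : nm f ∈ pySystemFields <;>
      by_cases h3 : nm f ∈ acc <;>
      simp [hgood, h1, h2, h3, PySem.Set.add, PySem.Set.contains, List.contains_eq_mem]
  rw [hA, PySem.List.foldl_if_eq_foldl_filter, ← PySem.Set.update_map_eq_foldl_add,
      PySem.Set.update_nil_left]
  -- B's side: peel the system-field skip into the same filter
  have hB : tf.foldl
      (fun d f =>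
        let n := nm f
        if pySystemFields.contains f || pySystemFields.contains n then d
        else if !(PySem.Dict.contains d n) || decide (f < PySem.Dict.getD d n "") then
          PySem.Dict.insert d n f
        else d)
      PySem.Dict.empty =
      (tf.filter goodb).foldl (bestStep nm) PySem.Dict.empty := by
    rw [← PySem.List.foldl_if_eq_foldl_filter]
    apply PySem.List.foldl_congr_mem
    intro d f _
    by_cases h1 : f ∈ pySystemFields <;>
      by_cases h2 : nm f ∈ pySystemFields <;>
      simp [hgood, h1, h2, bestStep, List.contains_eq_mem]
  rw [hB]
  -- both sides are the sorted class minima mapped through nm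
  have hsel : PySem.List.sorted
      ((tf.filter goodb).foldl (bestStep nm) PySem.Dict.empty).values (fun x => x) false =
      selFields nm (tf.filter goodb) := by
    have hpwsel : (selFields nm (tf.filter goodb)).Pairwise (· < ·) :=
      selFields_pairwise nm (tf.filter goodb).length _ (le_refl _)
    have hndsel : (selFields nm (tf.filter goodb)).Nodup :=
      hpwsel.imp (fun h => ne_of_lt h)
    have hperm : (selFields nm (tf.filter goodb)).Perm
        ((tf.filter goodb).foldl (bestStep nm) PySem.Dict.empty).values := by
      refine (List.perm_ext_iff_of_nodup hndsel
        (bestFold_values_nodup nm (tf.filter goodb))).mpr ?_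
      intro x
      rw [selFields_mem nm (tf.filter goodb).length _ (le_refl _) x,
        bestFold_values_mem nm (tf.filter goodb) x]
    exact PySem.List.sorted_eq_of_perm_of_pairwise_lt _ _ _ hperm hpwsel
  rw [hsel]
  exact (selFields_map_eq_dedup nm
    ((PySem.List.sorted tf (fun x => x) false).filter goodb).length
    _ _ (le_refl _)
    (List.Pairwise.filter _ (PySem.List.sorted_pairwise tf (fun x => x)))
    (((PySem.List.sorted_perm tf (fun x => x) false).filter _).symm)).symm
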